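-- pv_equiv track=rewrite | github.com/Suni1174/edgefleet | code/sam3/edgefleet/utils.py | get_shot_segments
-- ===== SOURCE A (Python) =====
-- from typing import List, Dict, Tuple, Optional
--
-- def get_shot_segments(shot_boundaries: List[int], total_frames: int) -> List[Tuple[int, int]]:
--     """
--     Convert shot boundaries to shot segments (start, end) pairs.
--
--     Args:
--         shot_boundaries (List[int]): List of shot starting frame indices
--         total_frames (int): Total number of frames in the video
--
--     Returns:
--         List[Tuple[int, int]]: List of (start_frame, end_frame) tuples for each shot
--     """
--     if not shot_boundaries:
--         return [(0, total_frames - 1)]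
--
--     segments = []
--     for i in range(len(shot_boundaries)):
--         start_frame = shot_boundaries[i]
--         if i + 1 < len(shot_boundaries):
--             end_frame = shot_boundaries[i + 1] - 1
--         else:
--             end_frame = total_frames - 1
--
--         if start_frame <= end_frame:
--             segments.append((start_frame, end_frame))
--
--     return segments
-- ===== SOURCE B (Python) =====
-- def get_shot_segments(shot_boundaries, total_frames):
--     if not shot_boundaries:
--         return [(0, total_frames - 1)]
--     out = []
--     nxt = total_frames
--     for s in reversed(shot_boundaries):
--         if s < nxt:
--             out.append((s, nxt - 1))
--         nxt = s
--     out.reverse()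
--     return out
-- ===== Notes on version B (the rewrite author's own statement) =====
-- stated objective: alternative
-- what changed: Traverses the boundaries back-to-front carrying the following boundary as running state (seeded with total_frames), appending segments and reversing at the end, instead of A's forward index loop with an i+1 lookup and a last-element branch.
import Mathlib
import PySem

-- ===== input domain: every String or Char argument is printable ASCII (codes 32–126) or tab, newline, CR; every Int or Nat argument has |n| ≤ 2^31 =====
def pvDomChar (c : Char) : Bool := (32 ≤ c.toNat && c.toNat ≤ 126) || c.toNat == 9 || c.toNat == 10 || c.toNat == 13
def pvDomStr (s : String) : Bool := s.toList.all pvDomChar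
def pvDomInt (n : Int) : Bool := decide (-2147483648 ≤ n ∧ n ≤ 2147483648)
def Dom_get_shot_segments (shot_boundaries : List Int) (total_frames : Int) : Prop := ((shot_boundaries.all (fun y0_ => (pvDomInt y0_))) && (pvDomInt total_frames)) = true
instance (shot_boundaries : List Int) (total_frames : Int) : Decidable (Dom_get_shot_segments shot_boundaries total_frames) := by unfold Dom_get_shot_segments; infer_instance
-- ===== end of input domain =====

-- B traverses the boundaries back-to-front carrying the following boundary as running state
-- (seeded with total_frames) and reverses at the end, instead of A's forward index loop with
-- an i+1 lookup and a last-element branch (alternative decomposition, same linear cost).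

-- ===== PORT A =====
-- literal transliteration of A: index loop over range(len(shot_boundaries)) appending to segments
def get_shot_segments (shot_boundaries : List Int) (total_frames : Int) : List (Int × Int) :=
  if shot_boundaries = [] then [(0, total_frames - 1)]
  else
    -- start_frame = shot_boundaries[i]; end_frame = the branch on i+1 < len, inlined
    (PySem.List.pyRange 0 (shot_boundaries.length : Int) 1).foldl
      (fun segments i =>
        if PySem.List.pyGetD shot_boundaries i 0 ≤
            (if i + 1 < (shot_boundaries.length : Int) then
              PySem.List.pyGetD shot_boundaries (i + 1) 0 - 1
            else total_frames - 1) then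
          segments ++ [(PySem.List.pyGetD shot_boundaries i 0,
            if i + 1 < (shot_boundaries.length : Int) then
              PySem.List.pyGetD shot_boundaries (i + 1) 0 - 1
            else total_frames - 1)]
        else segments)
      []

-- ===== PORT B =====
-- literal transliteration of B: loop over reversed(shot_boundaries) carrying (out, nxt), then out.reverse()
def get_shot_segments_alt (shot_boundaries : List Int) (total_frames : Int) : List (Int × Int) :=
  if shot_boundaries = [] then [(0, total_frames - 1)]
  else
    (shot_boundaries.reverse.foldl
      (fun (st : List (Int × Int) × Int) s =>
        (if s < st.2 then st.1 ++ [(s, st.2 - 1)] else st.1, s))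
      ([], total_frames)).1.reverse

-- ===== PRECONDITION & SPEC =====
def Spec_get_shot_segments (shot_boundaries : List Int) (total_frames : Int) (out : List (Int × Int)) : Prop := out = get_shot_segments_alt shot_boundaries total_frames
instance (shot_boundaries : List Int) (total_frames : Int) (out : List (Int × Int)) : Decidable (Spec_get_shot_segments shot_boundaries total_frames out) := by unfold Spec_get_shot_segments; infer_instance

-- ===== CLAIM (what is proved, stated in full; the proofs are below) =====
def Claim_equal_get_shot_segments : Prop := ∀ (shot_boundaries : List Int) (total_frames : Int), Dom_get_shot_segments shot_boundaries total_frames → Spec_get_shot_segments shot_boundaries total_frames (get_shot_segments shot_boundaries total_frames)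

-- ===== LEMMAS AND PROOFS =====

-- one optional segment (s, nxt-1)
def pvSeg (s nxt : Int) : List (Int × Int) := if s < nxt then [(s, nxt - 1)] else []

-- segments emitted by B's reversed-order loop (head is processed first, against nxt)
def pvRevsegs : List Int → Int → List (Int × Int)
  | [], _ => []
  | s :: r, nxt => pvSeg s nxt ++ pvRevsegs r s

-- front-recursive specification: each boundary pairs with the next one, the last with tf
def pvSegs : List Int → Int → List (Int × Int)
  | [], _ => []
  | s :: r, tf => pvSeg s (r.headD tf) ++ pvSegs r tf

theorem pv_fold_revsegs (r : List Int) (acc : List (Int × Int)) (nxt : Int) :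
    (r.foldl (fun (st : List (Int × Int) × Int) s =>
        (if s < st.2 then st.1 ++ [(s, st.2 - 1)] else st.1, s)) (acc, nxt)).1
    = acc ++ pvRevsegs r nxt := by
  induction r generalizing acc nxt with
  | nil => simp [pvRevsegs]
  | cons s r ih =>
    simp only [List.foldl_cons, pvRevsegs]
    by_cases h : s < nxt
    · rw [if_pos h, ih, pvSeg, if_pos h]; simp
    · rw [if_neg h, ih, pvSeg, if_neg h]; simp

theorem pv_revsegs_concat (l : List Int) (s nxt : Int) :
    pvRevsegs (l ++ [s]) nxt = pvRevsegs l nxt ++ pvSeg s (l.getLastD nxt) := by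
  induction l generalizing nxt with
  | nil => simp [pvRevsegs]
  | cons a l ih =>
    simp only [List.cons_append, pvRevsegs, ih, List.getLastD_cons, List.append_assoc]

theorem pv_revsegs_reverse (l : List Int) (tf : Int) :
    (pvRevsegs l.reverse tf).reverse = pvSegs l tf := by
  induction l generalizing tf with
  | nil => simp [pvRevsegs, pvSegs]
  | cons s r ih =>
    have h1 : (s :: r).reverse = r.reverse ++ [s] := by simp
    rw [h1, pv_revsegs_concat, List.reverse_append, ih]
    have h2 : (r.reverse.getLastD tf) = r.headD tf := by
      cases r with
      | nil => rfl
      | cons t r' => simp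
    rw [h2]
    have h3 : (pvSeg s (r.headD tf)).reverse = pvSeg s (r.headD tf) := by
      unfold pvSeg; split_ifs <;> rfl
    rw [h3, pvSegs]

theorem pv_zip_segs (l : List Int) (tf : Int) :
    ((l.zip (l.tail ++ [tf])).filter (fun p => p.1 ≤ p.2 - 1)).map (fun p => (p.1, p.2 - 1))
    = pvSegs l tf := by
  induction l with
  | nil => simp [pvSegs]
  | cons s r ih =>
    cases r with
    | nil =>
      simp only [pvSegs, pvSeg, List.tail_cons, List.nil_append, List.zip, List.zipWith]
      by_cases h : s < tf
      · have h' : s ≤ tf - 1 := by omega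
        simp [h, h', List.filter, List.headD]
      · have h' : ¬ s ≤ tf - 1 := by omega
        simp [h, h', List.filter, List.headD]
    | cons t r' =>
      have hz : (s :: t :: r').zip ((s :: t :: r').tail ++ [tf])
          = (s, t) :: (t :: r').zip ((t :: r').tail ++ [tf]) := by simp
      rw [hz]
      simp only [List.filter_cons]
      by_cases h : s < t
      · have h' : (decide (s ≤ t - 1)) = true := by simp; omega
        rw [h', if_pos rfl, List.map_cons, ih]
        simp [pvSegs, pvSeg, h]
      · have h' : (decide (s ≤ t - 1)) = false := by simp; omega
        rw [h', if_neg (by simp), ih]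
        simp [pvSegs, pvSeg, h]

-- the (start, end+1) pairs A reads at index i are exactly the zip of the list with its shifted-plus-sentinel ends
theorem pv_map_idx_eq_zip (sb : List Int) (tf : Int) (hne : sb ≠ []) :
    (PySem.List.pyRange 0 (sb.length : Int) 1).map
      (fun i => (PySem.List.pyGetD sb i 0,
        if i + 1 < (sb.length : Int) then PySem.List.pyGetD sb (i + 1) 0 else tf))
    = sb.zip (sb.tail ++ [tf]) := by
  have hlen : sb.tail.length = sb.length - 1 := List.length_tail
  have hpos : 0 < sb.length := List.length_pos_iff.mpr hne
  rw [PySem.List.pyRange_zero_nat, List.map_map]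
  apply List.ext_getElem
  · simp [List.length_zip, hlen]
    omega
  · intro k h1 h2
    have hk : k < sb.length := by simpa using h1
    have hcast : ((k : Int) + 1 < (sb.length : Int)) ↔ k + 1 < sb.length := by exact_mod_cast Iff.rfl
    simp only [List.getElem_map, List.getElem_range, Function.comp_apply, List.getElem_zip]
    have h₁ : PySem.List.pyGetD sb (k : Int) 0 = sb.getD k 0 := PySem.List.pyGetD_natCast sb k 0
    have h₂ : PySem.List.pyGetD sb ((k : Int) + 1) 0 = sb.getD (k + 1) 0 := by
      have := PySem.List.pyGetD_natCast sb (k + 1) 0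
      simpa using this
    rw [h₁, h₂]
    have hget : sb.getD k 0 = sb[k] := List.getD_eq_getElem sb 0 hk
    rw [hget]
    refine Prod.ext rfl ?_
    by_cases hc : k + 1 < sb.length
    · rw [if_pos (hcast.mpr hc)]
      have hkt : k < sb.tail.length := by omega
      rw [List.getElem_append_left hkt, List.getD_eq_getElem sb 0 hc, List.getElem_tail]
    · rw [if_neg (fun h => hc (hcast.mp h))]
      have hk' : k = sb.tail.length := by omega
      simp [hk']

-- A's loop equals the front-recursive specification
theorem pv_A_eq_segs (sb : List Int) (tf : Int) (hne : sb ≠ []) :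
    get_shot_segments sb tf = pvSegs sb tf := by
  unfold get_shot_segments
  rw [if_neg hne]
  have key := PySem.List.foldl_append_if
      (fun i => decide (PySem.List.pyGetD sb i 0 ≤
        (if i + 1 < (sb.length : Int) then PySem.List.pyGetD sb (i + 1) 0 - 1 else tf - 1)))
      (fun i => (PySem.List.pyGetD sb i 0,
        if i + 1 < (sb.length : Int) then PySem.List.pyGetD sb (i + 1) 0 - 1 else tf - 1))
      (PySem.List.pyRange 0 (sb.length : Int) 1) []
  simp only [decide_eq_true_eq, List.nil_append] at key
  rw [key, ← pv_zip_segs sb tf, ← pv_map_idx_eq_zip sb tf hne, List.filter_map, List.map_map]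
  congr 1
  · funext i
    simp only [Function.comp_apply]
    by_cases hc : i + 1 < (sb.length : Int) <;> simp [hc]
  · congr 1
    funext i
    simp only [Function.comp_apply]
    by_cases hc : i + 1 < (sb.length : Int) <;> simp [hc]

-- ===== VERDICT (by name: the statement is the Claim_ definition above) =====
theorem get_shot_segments_spec : Claim_equal_get_shot_segments := by
  intro sb tf _
  unfold Spec_get_shot_segments
  by_cases hne : sb = []
  · simp [hne, get_shot_segments, get_shot_segments_alt]
  · rw [pv_A_eq_segs sb tf hne]
    unfold get_shot_segments_alt
    rw [if_neg hne, pv_fold_revsegs, List.nil_append, pv_revsegs_reverse]
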